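-- pv_equiv track=rewrite | github.com/cartastagnola/rototiller | src/UTILStiller.py | binary_search_r
-- ===== SOURCE A (Python) =====
-- def binary_search_r(lst, target):
--     low = 0
--     high = len(lst)
--
--     while low < high:
--         mid = (high + low) // 2
--         if lst[mid] <= target:
--             low = mid + 1
--         else:
--             high = mid
--     return high
-- ===== SOURCE B (Python) =====
-- def binary_search_r(lst, target):
--     # Divide-and-conquer on the list itself: recurse into one half (a slice)
--     # and add back the offset; no low/high index state.
--     if not lst:
--         return 0
--     mid = len(lst) // 2
--     if lst[mid] <= target:
--         return mid + 1 + binary_search_r(lst[mid + 1:], target)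
--     else:
--         return binary_search_r(lst[:mid], target)
-- ===== Notes on version B (the rewrite author's own statement) =====
-- stated objective: alternative
-- what changed: A's iterative while-loop over a (low, high) index window is replaced by a genuine divide-and-conquer recursion on list slices: recurse into lst[mid+1:] or lst[:mid] and add the offset back, with no index state.
import Mathlib
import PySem

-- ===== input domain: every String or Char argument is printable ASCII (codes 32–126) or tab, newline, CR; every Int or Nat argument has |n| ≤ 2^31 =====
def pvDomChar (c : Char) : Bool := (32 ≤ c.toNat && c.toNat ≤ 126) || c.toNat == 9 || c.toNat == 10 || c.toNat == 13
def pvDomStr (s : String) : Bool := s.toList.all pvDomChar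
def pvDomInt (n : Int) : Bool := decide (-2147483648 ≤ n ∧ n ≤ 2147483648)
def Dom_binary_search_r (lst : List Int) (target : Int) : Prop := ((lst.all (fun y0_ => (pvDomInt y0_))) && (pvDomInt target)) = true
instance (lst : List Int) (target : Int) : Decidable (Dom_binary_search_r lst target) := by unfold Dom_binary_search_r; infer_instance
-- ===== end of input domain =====

-- B replaces A's iterative low/high index loop by a divide-and-conquer recursion on
-- list slices (same comparisons, same midpoints); objective: alternative decomposition.

-- ===== PORT A =====
-- A's while-loop as tail recursion on the mutable state (low, high); lst[mid] is always
-- in range (0 ≤ low ≤ mid < high ≤ len lst along every reachable state), so the .getD 0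
-- default of pyGet? is never used.
def bsAWhile (lst : List Int) (target low high : Int) : Int :=
  if _h : low < high then
    let mid := PySem.Int.floordiv (high + low) 2
    if (PySem.List.pyGet? lst mid).getD 0 ≤ target then
      bsAWhile lst target (mid + 1) high
    else
      bsAWhile lst target low mid
  else high
termination_by (high - low).toNat
decreasing_by
  · have hm := PySem.Int.floordiv_mul_add_mod (high + low) 2
    have h0 := PySem.Int.mod_nonneg (high + low) (by norm_num : (0:Int) < 2)
    have h1 := PySem.Int.mod_lt (high + low) (by norm_num : (0:Int) < 2)
    omega
  · have hm := PySem.Int.floordiv_mul_add_mod (high + low) 2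
    have h0 := PySem.Int.mod_nonneg (high + low) (by norm_num : (0:Int) < 2)
    have h1 := PySem.Int.mod_lt (high + low) (by norm_num : (0:Int) < 2)
    omega

def binary_search_r (lst : List Int) (target : Int) : Int :=
  bsAWhile lst target 0 (PySem.List.len lst)

-- ===== PORT B =====
-- Source B's slices lst[mid+1:] and lst[:mid] have nonnegative in-range bounds, so they are
-- exactly List.drop (mid+1) and List.take mid; len(lst)//2 on the nonnegative length is
-- exactly Nat division.
def binary_search_r_alt (lst : List Int) (target : Int) : Int :=
  if _h : lst.isEmpty then 0
  else
    let mid := lst.length / 2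
    if (PySem.List.pyGet? lst (mid : Int)).getD 0 ≤ target then
      (mid : Int) + 1 + binary_search_r_alt (lst.drop (mid + 1)) target
    else
      binary_search_r_alt (lst.take mid) target
termination_by lst.length
decreasing_by
  · have hne : lst.length ≠ 0 := by simpa [List.isEmpty_iff_length_eq_zero] using _h
    simp only [List.length_drop]
    omega
  · have hne : lst.length ≠ 0 := by simpa [List.isEmpty_iff_length_eq_zero] using _h
    simp only [List.length_take]
    omega

-- ===== PRECONDITION & SPEC =====
def Spec_binary_search_r (lst : List Int) (target : Int) (out : Int) : Prop := out = binary_search_r_alt lst target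
instance (lst : List Int) (target : Int) (out : Int) : Decidable (Spec_binary_search_r lst target out) := by unfold Spec_binary_search_r; infer_instance

-- ===== CLAIM (what is proved, stated in full; the proofs are below) =====
def Claim_equal_binary_search_r : Prop := ∀ (lst : List Int) (target : Int), Dom_binary_search_r lst target → Spec_binary_search_r lst target (binary_search_r lst target)

-- ===== LEMMAS AND PROOFS =====

-- The loop on the window [low, high) computes low + B's answer on the slice lst[low:high].
lemma bsAWhile_eq_alt (lst : List Int) (target : Int) (n : Nat) :
    ∀ low high : Int, (high - low).toNat = n → 0 ≤ low → low ≤ high → high ≤ lst.length →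
      bsAWhile lst target low high
        = low + binary_search_r_alt ((lst.drop low.toNat).take (high - low).toNat) target := by
  induction n using Nat.strong_induction_on with
  | _ n ih =>
    intro low high hn h0 hlh hhl
    by_cases hlt : low < high
    · -- window nonempty
      rw [bsAWhile]
      simp only [dif_pos hlt]
      set m : Int := PySem.Int.floordiv (high + low) 2 with hmdef
      have hm := PySem.Int.floordiv_mul_add_mod (high + low) 2
      have hr0 := PySem.Int.mod_nonneg (high + low) (by norm_num : (0:Int) < 2)
      have hr1 := PySem.Int.mod_lt (high + low) (by norm_num : (0:Int) < 2)
      rw [← hmdef] at hm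
      clear_value m
      have hlm : low ≤ m := by omega
      have hmh : m < high := by omega
      -- the slice and its midpoint
      set sub : List Int := (lst.drop low.toNat).take (high - low).toNat with hsub
      have hsublen : sub.length = (high - low).toNat := by
        rw [hsub]; simp [List.length_take, List.length_drop]; omega
      have hmid : sub.length / 2 = (m - low).toNat := by omega
      have hsubne : ¬ sub.isEmpty = true := by
        rw [List.isEmpty_iff_length_eq_zero, hsublen]; omega
      -- the probed element of the slice is A's probed element
      have hmlt : m.toNat < lst.length := by omega
      have hidx : (low.toNat + sub.length / 2) < lst.length := by omega
      have hidx' : sub.length / 2 < sub.length := by omega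
      have helem : sub[sub.length / 2]'hidx' = lst[m.toNat]'hmlt := by
        have h1 : sub[sub.length / 2]'hidx' = lst[low.toNat + sub.length / 2]'hidx := by
          simp [hsub, List.getElem_take, List.getElem_drop]
        rw [h1]
        congr 1
        omega
      have hgetA : (PySem.List.pyGet? lst m).getD 0 = lst[m.toNat]'hmlt := by
        rw [PySem.List.pyGet?_eq_some_getElem lst (i := m) (by omega) (by omega)]
        rfl
      have hgetB : (PySem.List.pyGet? sub ((sub.length / 2 : Nat) : Int)).getD 0
          = lst[m.toNat]'hmlt := by
        rw [PySem.List.pyGet?_natCast]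
        simp [List.getElem?_eq_getElem hidx', helem]
      -- unfold one step of B on the slice
      rw [binary_search_r_alt, dif_neg hsubne]
      simp only []
      rw [hgetA, hgetB]
      by_cases hcmp : lst[m.toNat]'hmlt ≤ target
      · rw [if_pos hcmp, if_pos hcmp,
            ih (high - (m + 1)).toNat (by omega) (m + 1) high rfl (by omega) (by omega) hhl]
        have hdrop : sub.drop (sub.length / 2 + 1)
            = (lst.drop (m + 1).toNat).take (high - (m + 1)).toNat := by
          rw [hmid, hsub, List.drop_take, List.drop_drop]
          congr 1
          · omega
          · congr 1
            omega
        rw [hdrop]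
        omega
      · rw [if_neg hcmp, if_neg hcmp,
            ih (m - low).toNat (by omega) low m rfl h0 hlm (by omega)]
        have htake : sub.take (sub.length / 2) = (lst.drop low.toNat).take (m - low).toNat := by
          rw [hmid, hsub, List.take_take]
          congr 1
          omega
        rw [htake]
    · -- window empty: low = high
      rw [bsAWhile]
      simp only [dif_neg hlt]
      have : high = low := by omega
      subst this
      rw [binary_search_r_alt]
      simp

-- ===== VERDICT (by name: the statement is the Claim_ definition above) =====
theorem binary_search_r_spec : Claim_equal_binary_search_r := by
  intro lst target _
  unfold Spec_binary_search_r binary_search_r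
  rw [PySem.List.len_eq,
      bsAWhile_eq_alt lst target ((lst.length : Int) - 0).toNat 0 (lst.length) rfl
        (by omega) (by omega) (by omega)]
  simp
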